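-- pv_equiv track=rewrite | github.com/klawah/Optimal_transport | multi_OT_trial/src/multiscale_OT_trial_copy/scaled_OT.py | _is_valid_scaling
-- ===== SOURCE A (Python) =====
-- def _is_valid_scaling(sizes):
--     scaling_factors = []
--     cumulative_scaling = [1]
--
--     current_size = sizes[0]
--     for size in sizes[1:]:
--         if current_size % size != 0:
--             return False, [], []
--         scaling_factor = current_size // size
--         scaling_factors.append(scaling_factor)
--         cumulative_scaling.append(scaling_factor * cumulative_scaling[-1])
--         current_size = size
--
--     return True, scaling_factors, cumulative_scaling
-- ===== SOURCE B (Python) =====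
-- def _is_valid_scaling(sizes):
--     head = sizes[0]  # empty input raises IndexError, matching the original interface
--     pairs = list(zip(sizes, sizes[1:]))
--     if any(a % b != 0 for a, b in pairs):
--         return False, [], []
--     # cumulative products telescope: the k-th cumulative entry equals head floor-divided by the k-th size
--     return True, [a // b for a, b in pairs], [1] + [head // s for s in sizes[1:]]
-- ===== Notes on version B (the rewrite author's own statement) =====
-- stated objective: simpler
-- what changed: Replaces A's stateful loop (running current_size, appended factor list, running cumulative product read back via cumulative_scaling[-1]) by an any() divisibility check over zipped consecutive pairs plus two closed-form comprehensions, using that the cumulative products telescope to the head element floor-divided by each later size.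
import Mathlib
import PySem

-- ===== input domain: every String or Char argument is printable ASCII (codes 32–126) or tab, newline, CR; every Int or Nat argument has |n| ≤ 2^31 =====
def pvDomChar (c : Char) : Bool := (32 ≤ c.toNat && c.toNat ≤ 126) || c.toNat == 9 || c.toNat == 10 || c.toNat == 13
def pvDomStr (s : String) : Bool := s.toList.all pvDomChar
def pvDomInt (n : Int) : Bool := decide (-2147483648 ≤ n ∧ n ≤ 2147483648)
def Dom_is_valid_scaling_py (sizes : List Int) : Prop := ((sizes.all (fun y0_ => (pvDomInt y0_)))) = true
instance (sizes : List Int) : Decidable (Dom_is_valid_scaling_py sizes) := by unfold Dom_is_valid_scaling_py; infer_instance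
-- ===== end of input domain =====

-- B replaces A's running-product loop by a pair-wise `any` check plus closed-form
-- comprehensions (the cumulative products telescope to head divided by each size); objective: simpler.
-- A mutates nothing; equivalence is about the return value.

-- ===== PORT A =====
-- the for-loop of A: state (current_size, scaling_factors, cumulative_scaling)
def is_valid_scaling_py_go : Int → List Int → List Int → List Int → Bool × List Int × List Int
  | _, [], sf, cs => (true, sf, cs)
  | cur, size :: rest, sf, cs =>
    if PySem.Int.mod cur size ≠ 0 then (false, [], [])
    else
      let f := PySem.Int.floordiv cur size
      is_valid_scaling_py_go size rest (sf ++ [f]) (cs ++ [f * cs.getLastD 1])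

def is_valid_scaling_py (sizes : List Int) : Bool × List Int × List Int :=
  is_valid_scaling_py_go (sizes.headD 0) (PySem.List.slice sizes (some 1) none) [] [1]

-- ===== PORT B =====
def is_valid_scaling_py_alt (sizes : List Int) : Bool × List Int × List Int :=
  let head := sizes.headD 0
  let tl := PySem.List.slice sizes (some 1) none
  let pairs := sizes.zip tl
  if pairs.any (fun p => PySem.Int.mod p.1 p.2 != 0) then (false, [], [])
  else (true, pairs.map (fun p => PySem.Int.floordiv p.1 p.2),
        1 :: tl.map (fun s => PySem.Int.floordiv head s))

-- ===== PRECONDITION & SPEC =====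
-- Pre_ excludes exactly the inputs where Python A raises: the empty list (IndexError when
-- reading the head) and lists where the loop reaches a zero divisor, i.e. a zero in the
-- tail with no earlier pair already failing the divisibility test (ZeroDivisionError).
def Pre_is_valid_scaling_py (sizes : List Int) : Prop :=
  sizes ≠ [] ∧
  ∀ i < sizes.length - 1, sizes.getD (i + 1) 1 = 0 →
    ∃ j < i, (∀ k ≤ j, sizes.getD (k + 1) 1 ≠ 0) ∧
      PySem.Int.mod (sizes.getD j 1) (sizes.getD (j + 1) 1) ≠ 0
instance (sizes : List Int) : Decidable (Pre_is_valid_scaling_py sizes) := by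
  unfold Pre_is_valid_scaling_py; infer_instance

def pvWitness_is_valid_scaling_py : List Int := [24, 12, 4, 2]

def Spec_is_valid_scaling_py (sizes : List Int) (out : Bool × List Int × List Int) : Prop := out = is_valid_scaling_py_alt sizes
instance (sizes : List Int) (out : Bool × List Int × List Int) : Decidable (Spec_is_valid_scaling_py sizes out) := by unfold Spec_is_valid_scaling_py; infer_instance

-- ===== CLAIM (what is proved, stated in full; the proofs are below) =====
def Claim_equal_is_valid_scaling_py : Prop := ∀ (sizes : List Int), Dom_is_valid_scaling_py sizes → Pre_is_valid_scaling_py sizes → Spec_is_valid_scaling_py sizes (is_valid_scaling_py sizes)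

-- ===== LEMMAS AND PROOFS =====

-- the divisibility chain h :: t succeeds: every step has a nonzero divisor that divides
def PvChain : Int → List Int → Prop
  | _, [] => True
  | c, s :: r => s ≠ 0 ∧ s ∣ c ∧ PvChain s r

-- the loop stops with `return False` before hitting any zero divisor
def PvFirstViol : Int → List Int → Prop
  | _, [] => False
  | c, s :: r => s ≠ 0 ∧ (PySem.Int.mod c s ≠ 0 ∨ (PySem.Int.mod c s = 0 ∧ PvFirstViol s r))

theorem pv_dvd_of_chain (c : Int) (t : List Int) (h : PvChain c t) :
    ∀ x ∈ t, x ≠ 0 ∧ x ∣ c := by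
  induction t generalizing c with
  | nil => intro x hx; cases hx
  | cons s r ih =>
    obtain ⟨hs, hd, hc⟩ := h
    intro x hx
    rcases List.mem_cons.mp hx with hx | hx
    · subst hx
      exact ⟨hs, hd⟩
    · obtain ⟨hx0, hxs⟩ := ih s hc x hx
      exact ⟨hx0, hxs.trans hd⟩

theorem pv_chain_zip_dvd (t : List Int) : ∀ c, PvChain c t →
    ∀ p ∈ (c :: t).zip t, p.2 ∣ p.1 := by
  induction t with
  | nil => intro c _ p hp; simp [List.zip_nil_right] at hp
  | cons s r ih =>
    intro c hch p hp
    obtain ⟨hs, hd, hc⟩ := hch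
    simp only [List.zip_cons_cons, List.mem_cons] at hp
    rcases hp with hp | hp
    · rw [hp]; exact hd
    · exact ih s hc p hp

theorem pv_fdiv_exact (a b : Int) (hd : b ∣ a) :
    PySem.Int.floordiv a b * b = a := by
  have h := PySem.Int.floordiv_mul_add_mod a b
  rw [(PySem.Int.mod_eq_zero_iff_dvd a b).mpr hd] at h
  omega

theorem pv_fdiv_trans (a b c : Int) (hc : c ≠ 0)
    (hba : b ∣ a) (hcb : c ∣ b) :
    PySem.Int.floordiv a b * PySem.Int.floordiv b c = PySem.Int.floordiv a c := by
  apply mul_right_cancel₀ hc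
  rw [mul_assoc, pv_fdiv_exact b c hcb, pv_fdiv_exact a b hba,
    pv_fdiv_exact a c (hcb.trans hba)]

-- success case: the loop returns True with the appended factor/product lists
theorem pv_go_success (t : List Int) : ∀ (c : Int), PvChain c t → ∀ sf cs,
    is_valid_scaling_py_go c t sf cs =
      (true, sf ++ ((c :: t).zip t).map (fun p => PySem.Int.floordiv p.1 p.2),
        cs ++ t.map (fun x => cs.getLastD 1 * PySem.Int.floordiv c x)) := by
  induction t with
  | nil => intro c _ sf cs; simp [is_valid_scaling_py_go]
  | cons s r ih =>
    intro c hch sf cs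
    obtain ⟨hs, hd, hc⟩ := hch
    have hm : PySem.Int.mod c s = 0 := (PySem.Int.mod_eq_zero_iff_dvd c s).mpr hd
    simp only [is_valid_scaling_py_go, hm]
    rw [if_neg (show ¬ ((0:Int) ≠ 0) from by decide), ih s hc]
    simp only [Prod.mk.injEq]
    refine ⟨trivial, ?_, ?_⟩
    · simp [List.zip_cons_cons]
    · simp only [List.append_assoc, List.cons_append, List.nil_append,
        List.getLastD_concat, List.map_cons]
      congr 2
      · ring
      · apply List.map_congr_left
        intro x hx
        obtain ⟨hx0, hxs⟩ := pv_dvd_of_chain s r hc x hx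
        rw [← pv_fdiv_trans c s x hx0 hd hxs]
        ring

-- failure case: both programs return (False, [], [])
theorem pv_go_fail (t : List Int) : ∀ (c : Int), PvFirstViol c t → ∀ sf cs,
    is_valid_scaling_py_go c t sf cs = (false, [], []) ∧
      ((c :: t).zip t).any (fun p => PySem.Int.mod p.1 p.2 != 0) = true := by
  induction t with
  | nil => intro c h; cases h
  | cons s r ih =>
    intro c hv sf cs
    obtain ⟨hs, hv⟩ := hv
    rcases hv with hm | ⟨hm, hv⟩
    · constructor
      · simp [is_valid_scaling_py_go, hm]
      · simp [List.zip_cons_cons, List.any_cons, hm]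
    · have := ih s hv (sf ++ [PySem.Int.floordiv c s])
        (cs ++ [PySem.Int.floordiv c s * cs.getLastD 1])
      constructor
      · simp only [is_valid_scaling_py_go, hm]
        rw [if_neg (show ¬ ((0:Int) ≠ 0) from by decide)]
        exact this.1
      · simp [List.zip_cons_cons, List.any_cons, hm, (ih s hv [] []).2]

-- every admitted input either completes the chain or stops at a violation
theorem pv_pre_cases (t : List Int) : ∀ (c : Int),
    (∀ i < (c :: t).length - 1, (c :: t).getD (i + 1) 1 = 0 →
      ∃ j < i, (∀ k ≤ j, (c :: t).getD (k + 1) 1 ≠ 0) ∧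
        PySem.Int.mod ((c :: t).getD j 1) ((c :: t).getD (j + 1) 1) ≠ 0) →
    PvChain c t ∨ PvFirstViol c t := by
  induction t with
  | nil => intro c _; left; trivial
  | cons s r ih =>
    intro c hpre
    by_cases hs : s = 0
    · exfalso
      obtain ⟨j, hj, _⟩ := hpre 0 (by simp) (by simp [hs])
      omega
    by_cases hm : PySem.Int.mod c s = 0
    · have hpre' : ∀ i < (s :: r).length - 1, (s :: r).getD (i + 1) 1 = 0 →
          ∃ j < i, (∀ k ≤ j, (s :: r).getD (k + 1) 1 ≠ 0) ∧
            PySem.Int.mod ((s :: r).getD j 1) ((s :: r).getD (j + 1) 1) ≠ 0 := by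
        intro i hi hz
        obtain ⟨j, hj, hnz, hmod⟩ := hpre (i + 1) (by simp at hi ⊢; omega)
          (by simpa using hz)
        match j with
        | 0 => exact absurd hmod (by simpa using hm)
        | j + 1 =>
          refine ⟨j, by omega, ?_, by simpa using hmod⟩
          intro k hk
          have := hnz (k + 1) (by omega)
          simpa using this
      rcases ih s hpre' with hch | hfv
      · left; exact ⟨hs, (PySem.Int.mod_eq_zero_iff_dvd c s).mp hm, hch⟩
      · right; exact ⟨hs, Or.inr ⟨hm, hfv⟩⟩
    · right; exact ⟨hs, Or.inl hm⟩

-- ===== VERDICT (by name: the statement is the Claim_ definition above) =====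
theorem is_valid_scaling_py_spec : Claim_equal_is_valid_scaling_py := by
  intro sizes _ hpre
  obtain ⟨hne, hpre⟩ := hpre
  unfold Spec_is_valid_scaling_py
  obtain ⟨c, t, rfl⟩ : ∃ c t, sizes = c :: t := by
    cases sizes with
    | nil => exact absurd rfl hne
    | cons c t => exact ⟨c, t, rfl⟩
  rcases pv_pre_cases t c hpre with hch | hfv
  · -- success: True with factor list and telescoped cumulative list
    have hB : ∀ p ∈ (c :: t).zip t, ¬ (PySem.Int.mod p.1 p.2 != 0) = true := by
      intro p hp
      have : p.2 ∣ p.1 := pv_chain_zip_dvd t c hch p hp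
      simp [(PySem.Int.mod_eq_zero_iff_dvd p.1 p.2).mpr this]
    simp only [is_valid_scaling_py, PySem.List.slice_from_one, List.headD_cons,
      List.tail_cons]
    rw [pv_go_success t c hch [] [1]]
    simp only [is_valid_scaling_py_alt, PySem.List.slice_from_one, List.headD_cons,
      List.tail_cons]
    rw [if_neg (by simpa using hB)]
    simp
  · rw [is_valid_scaling_py,
      PySem.List.slice_from_one, List.headD_cons, List.tail_cons,
      (pv_go_fail t c hfv [] [1]).1]
    simp only [is_valid_scaling_py_alt, PySem.List.slice_from_one, List.headD_cons,
      List.tail_cons]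
    rw [if_pos (pv_go_fail t c hfv [] [1]).2]
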